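-- pv_equiv track=rewrite | github.com/tsao100/Kanji-Convert | unifont_shx.py | decode_glyph
-- ===== SOURCE A (Python) =====
-- def signed_nibble(n):
--     return n - 16 if n >= 8 else n
--
-- def decode_vector(byte):
--     dx = signed_nibble((byte >> 4) & 0xF)
--     dy = signed_nibble(byte & 0xF)
--     return dx, dy
--
-- def decode_glyph(glyph_bytes):
--     x, y = 0, 0
--     path = []
--     stroke = [(x, y)]
--
--     for b in glyph_bytes:
--         if b < 0x80:
--             dx, dy = decode_vector(b)
--             x += dx
--             y += dy
--             stroke.append((x, y))
--         # control bytes 可擴充（0x08 / 0x0E 等）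
--         elif b == 0x0E:
--             # skip next 2 bytes
--             continue
--         elif b == 0x08:
--             # vector escape, optional
--             continue
--         else:
--             # fallback unknown control
--             continue
--
--     if len(stroke) > 1:
--         path.append(stroke)
--     return path
-- ===== SOURCE B (Python) =====
-- def _signed_nibble(n):
--     return n - 16 if n >= 8 else n
--
-- def _solve(bs):
--     # points reached after each plottable byte of bs, relative to the position before bs
--     if len(bs) <= 1:
--         if bs and bs[0] < 0x80:
--             b = bs[0]
--             return [(_signed_nibble((b >> 4) & 0xF), _signed_nibble(b & 0xF))]
--         return []
--     mid = len(bs) // 2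
--     left = _solve(bs[:mid])
--     right = _solve(bs[mid:])
--     if left:
--         ex, ey = left[-1]
--         return left + [(ex + px, ey + py) for px, py in right]
--     return right
--
-- def decode_glyph(glyph_bytes):
--     pts = _solve(list(glyph_bytes))
--     return [[(0, 0)] + pts] if pts else []
-- ===== Notes on version B (the rewrite author's own statement) =====
-- stated objective: alternative
-- what changed: B replaces A's single left-to-right running-sum loop with a divide-and-conquer: it recursively decodes each half of the byte list into a relative stroke and merges by translating the right half's points by the left half's endpoint, prepending the origin point only at the end.
import Mathlib
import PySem

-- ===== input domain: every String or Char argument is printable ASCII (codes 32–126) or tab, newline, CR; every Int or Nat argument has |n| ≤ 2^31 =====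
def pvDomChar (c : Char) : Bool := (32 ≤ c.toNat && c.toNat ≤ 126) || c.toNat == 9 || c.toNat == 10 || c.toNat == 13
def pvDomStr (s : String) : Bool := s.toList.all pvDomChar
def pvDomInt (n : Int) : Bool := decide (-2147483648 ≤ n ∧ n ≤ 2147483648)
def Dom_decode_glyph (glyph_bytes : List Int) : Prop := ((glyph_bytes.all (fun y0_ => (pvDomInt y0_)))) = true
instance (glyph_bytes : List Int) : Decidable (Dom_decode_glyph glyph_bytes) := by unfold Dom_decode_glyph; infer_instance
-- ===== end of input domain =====

-- ===== PORT A =====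
-- B replaces A's single running-sum loop by a divide-and-conquer that merges half-strokes by translation (objective: alternative).
def signed_nibble (n : Int) : Int := if n ≥ 8 then n - 16 else n

def decode_vector (byte : Int) : Int × Int :=
  (signed_nibble (PySem.Int.band (byte >>> (4 : Nat)) 0xF), signed_nibble (PySem.Int.band byte 0xF))

def decode_glyph (glyph_bytes : List Int) : List (List (Int × Int)) :=
  let st := glyph_bytes.foldl
    (fun (s : Int × Int × List (Int × Int)) b =>
      if b < 0x80 then
        let d := decode_vector b
        (s.1 + d.1, s.2.1 + d.2, s.2.2 ++ [(s.1 + d.1, s.2.1 + d.2)])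
      else s)
    (0, 0, [((0 : Int), (0 : Int))])
  let stroke := st.2.2
  if stroke.length > 1 then [stroke] else []

-- ===== PORT B =====
def signed_nibble_b (n : Int) : Int := if n ≥ 8 then n - 16 else n

def decode_pair_b (b : Int) : Int × Int :=
  (signed_nibble_b (PySem.Int.band (b >>> (4 : Nat)) 0xF), signed_nibble_b (PySem.Int.band b 0xF))

-- divide and conquer: points after each plottable byte, relative to the position before `bs`
def solve_b (bs : List Int) : List (Int × Int) :=
  if _h : bs.length ≤ 1 then
    match bs with
    | [] => []
    | b :: _ => if b < 0x80 then [decode_pair_b b] else []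
  else
    let mid := bs.length / 2
    let left := solve_b (bs.take mid)
    let right := solve_b (bs.drop mid)
    match left.getLast? with
    | some e => left ++ right.map (fun p => (e.1 + p.1, e.2 + p.2))
    | none => right
termination_by bs.length
decreasing_by
  · simp only [List.length_take]; omega
  · simp only [List.length_drop]; omega

def decode_glyph_alt (glyph_bytes : List Int) : List (List (Int × Int)) :=
  let pts := solve_b glyph_bytes
  if pts ≠ [] then [((0 : Int), (0 : Int)) :: pts] else []

-- ===== PRECONDITION & SPEC =====
def Spec_decode_glyph (glyph_bytes : List Int) (out : List (List (Int × Int))) : Prop := out = decode_glyph_alt glyph_bytes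
instance (glyph_bytes : List Int) (out : List (List (Int × Int))) : Decidable (Spec_decode_glyph glyph_bytes out) := by unfold Spec_decode_glyph; infer_instance

-- ===== CLAIM (what is proved, stated in full; the proofs are below) =====
def Claim_equal_decode_glyph : Prop := ∀ (glyph_bytes : List Int), Dom_decode_glyph glyph_bytes → Spec_decode_glyph glyph_bytes (decode_glyph glyph_bytes)

-- ===== LEMMAS AND PROOFS =====
-- proof-side specification: the prefix-sum points both programs compute, relative to (x, y)
def rel (x y : Int) : List (Int × Int) → List (Int × Int)
  | [] => []
  | d :: ds => (x + d.1, y + d.2) :: rel (x + d.1) (y + d.2) ds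

-- endpoint after all deltas
def endp (x y : Int) : List (Int × Int) → Int × Int
  | [] => (x, y)
  | d :: ds => endp (x + d.1) (y + d.2) ds

def deltas (bs : List Int) : List (Int × Int) :=
  (bs.filter (fun b => b < 0x80)).map decode_pair_b

theorem decode_vector_eq (b : Int) : decode_vector b = decode_pair_b b := rfl

-- A's loop invariant
theorem foldA_inv (l : List Int) (x y : Int) (stroke : List (Int × Int)) :
    (l.foldl
      (fun (s : Int × Int × List (Int × Int)) b =>
        if b < 0x80 then
          let d := decode_vector b
          (s.1 + d.1, s.2.1 + d.2, s.2.2 ++ [(s.1 + d.1, s.2.1 + d.2)])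
        else s)
      (x, y, stroke))
    = ((endp x y (deltas l)).1, (endp x y (deltas l)).2, stroke ++ rel x y (deltas l)) := by
  induction l generalizing x y stroke with
  | nil => simp [rel, deltas, endp]
  | cons b bs ih =>
    by_cases hb : b < 0x80
    · have step : (if b < (0x80 : Int) then
            let d := decode_vector b
            ((x, y, stroke).1 + d.1, (x, y, stroke).2.1 + d.2,
              (x, y, stroke).2.2 ++ [((x, y, stroke).1 + d.1, (x, y, stroke).2.1 + d.2)])
          else (x, y, stroke))
          = (x + (decode_pair_b b).1, y + (decode_pair_b b).2,
             stroke ++ [(x + (decode_pair_b b).1, y + (decode_pair_b b).2)]) := by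
        simp [hb, decode_vector_eq]
      rw [List.foldl_cons, step, ih]
      simp [deltas, rel, endp, hb, List.append_assoc]
    · simp only [List.foldl_cons, hb, if_false, deltas, List.filter_cons, decide_false]
      exact ih x y stroke

theorem rel_translate (ds : List (Int × Int)) (x y a b : Int) :
    rel (a + x) (b + y) ds = (rel x y ds).map (fun p => (a + p.1, b + p.2)) := by
  induction ds generalizing x y with
  | nil => rfl
  | cons d ds' ih =>
    have h1 : a + x + d.1 = a + (x + d.1) := by ring
    have h2 : b + y + d.2 = b + (y + d.2) := by ring
    simp only [rel, List.map_cons, h1, h2, ih]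

theorem rel_append (x y : Int) (ds es : List (Int × Int)) :
    rel x y (ds ++ es) = rel x y ds ++ rel (endp x y ds).1 (endp x y ds).2 es := by
  induction ds generalizing x y with
  | nil => simp [rel, endp]
  | cons d ds' ih => simp [rel, endp, ih]

theorem getLast?_rel (x y : Int) (ds : List (Int × Int)) (h : ds ≠ []) :
    (rel x y ds).getLast? = some (endp x y ds) := by
  induction ds generalizing x y with
  | nil => exact absurd rfl h
  | cons d ds' ih =>
    cases ds' with
    | nil => simp [rel, endp]
    | cons e es => simp only [rel, endp, List.getLast?_cons_cons]
                   exact ih (x + d.1) (y + d.2) (by simp)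

theorem deltas_append (l r : List Int) : deltas (l ++ r) = deltas l ++ deltas r := by
  simp [deltas]

-- B's divide-and-conquer computes exactly rel 0 0 ∘ deltas
theorem solve_b_eq (bs : List Int) : solve_b bs = rel 0 0 (deltas bs) := by
  induction hn : bs.length using Nat.strong_induction_on generalizing bs with
  | _ n ih =>
  by_cases h : bs.length ≤ 1
  · rw [solve_b, dif_pos h]
    cases bs with
    | nil => rfl
    | cons b t =>
      cases t with
      | nil =>
        by_cases hb : b < 0x80 <;> simp [deltas, hb, rel]
      | cons c u => simp at h
  · rw [solve_b, dif_neg h]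
    dsimp only
    have h2 : 2 ≤ bs.length := by omega
    have htk : (bs.take (bs.length / 2)).length = bs.length / 2 := by simp; omega
    have hdr : (bs.drop (bs.length / 2)).length = bs.length - bs.length / 2 := by simp
    rw [ih _ (by omega : (bs.take (bs.length / 2)).length < n) _ rfl,
        ih _ (by omega : (bs.drop (bs.length / 2)).length < n) _ rfl]
    have hsplit : bs = bs.take (bs.length / 2) ++ bs.drop (bs.length / 2) := by simp
    conv_rhs => rw [hsplit]
    rw [deltas_append, rel_append]
    cases hL : rel 0 0 (deltas (bs.take (bs.length / 2))) with
    | nil =>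
      have hD : deltas (bs.take (bs.length / 2)) = [] := by
        cases hD : deltas (bs.take (bs.length / 2)) with
        | nil => rfl
        | cons d ds => rw [hD] at hL; exact absurd hL (by simp [rel])
      simp [hD, endp]
    | cons p ps =>
      have hD : deltas (bs.take (bs.length / 2)) ≠ [] := by
        intro hc; rw [hc] at hL; exact absurd hL.symm (by simp [rel])
      have hlast : (p :: ps).getLast? = some (endp 0 0 (deltas (bs.take (bs.length / 2)))) := by
        rw [← hL]; exact getLast?_rel 0 0 _ hD
      rw [hlast]
      have ht := rel_translate (deltas (bs.drop (bs.length / 2))) 0 0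
        (endp 0 0 (deltas (bs.take (bs.length / 2)))).1
        (endp 0 0 (deltas (bs.take (bs.length / 2)))).2
      simp only [add_zero] at ht
      simp [← ht]

-- ===== VERDICT (by name: the statement is the Claim_ definition above) =====
theorem decode_glyph_spec : Claim_equal_decode_glyph := by
  intro gb _
  show decode_glyph gb = decode_glyph_alt gb
  unfold decode_glyph decode_glyph_alt
  rw [foldA_inv, solve_b_eq]
  cases hds : rel 0 0 (deltas gb) with
  | nil => simp
  | cons p ps => simp
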